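-- pv_equiv track=rewrite | github.com/molqzone/cmsis-dsp-vs-eigen | benchmark_analysis/full_matrix_common.py | split_serial_into_runs
-- ===== SOURCE A (Python) =====
-- from typing import Sequence
--
-- def split_serial_into_runs(lines: Sequence[str], expected_runs: int) -> list[list[str]]:
--     """Splits serial output into run blocks ending with `done`."""
--
--     if expected_runs <= 0:
--         raise ValueError("expected_runs must be positive.")
--
--     runs: list[list[str]] = []
--     current: list[str] = []
--     for raw in lines:
--         line = raw.rstrip("\r\n")
--         current.append(line)
--         if line.strip().lower() == "done":
--             runs.append(current)
--             current = []
--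
--     if len(runs) < expected_runs:
--         raise ValueError(
--             f"Incomplete run capture: expected {expected_runs}, got {len(runs)}."
--         )
--     if len(runs) > expected_runs:
--         runs = runs[:expected_runs]
--     return runs
-- ===== SOURCE B (Python) =====
-- from typing import Sequence
--
--
-- def split_serial_into_runs(lines: Sequence[str], expected_runs: int) -> list[list[str]]:
--     """Splits serial output into run blocks ending with `done` (clean, index, slice)."""
--
--     if expected_runs <= 0:
--         raise ValueError("expected_runs must be positive.")
--
--     cleaned = [raw.rstrip("\r\n") for raw in lines]
--     bounds = [i for i, line in enumerate(cleaned) if line.strip().lower() == "done"]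
--
--     if len(bounds) < expected_runs:
--         raise ValueError(
--             f"Incomplete run capture: expected {expected_runs}, got {len(bounds)}."
--         )
--     bounds = bounds[:expected_runs]
--     return [cleaned[prev + 1:i + 1] for prev, i in zip([-1] + bounds, bounds)]
-- ===== Notes on version B (the rewrite author's own statement) =====
-- stated objective: alternative
-- what changed: Replaces A's single stateful accumulator loop (growing a current block and flushing it at each 'done') by a clean-all-lines pass, a scan collecting the indices of the 'done' terminators, truncation of that index list, and list slicing between consecutive terminator indices.
import Mathlib
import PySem

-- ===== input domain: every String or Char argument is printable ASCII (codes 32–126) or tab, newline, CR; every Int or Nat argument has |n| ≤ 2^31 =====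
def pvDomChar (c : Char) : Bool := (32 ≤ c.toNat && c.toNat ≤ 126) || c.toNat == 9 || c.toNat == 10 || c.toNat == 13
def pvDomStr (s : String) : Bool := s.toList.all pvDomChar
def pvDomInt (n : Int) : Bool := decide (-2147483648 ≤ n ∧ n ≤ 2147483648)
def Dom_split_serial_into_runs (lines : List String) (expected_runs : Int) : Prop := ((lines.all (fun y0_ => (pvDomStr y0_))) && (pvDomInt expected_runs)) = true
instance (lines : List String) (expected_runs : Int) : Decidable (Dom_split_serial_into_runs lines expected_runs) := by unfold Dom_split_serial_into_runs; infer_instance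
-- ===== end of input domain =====

-- B replaces A's stateful accumulator loop by cleaning all lines, collecting the 'done'
-- terminator indices, truncating that index list and slicing between consecutive indices
-- (objective: alternative decomposition, same cost). Both raise the same ValueErrors; those
-- inputs are excluded by Pre_.

-- shared helpers (both Pythons perform exactly these two operations on a line)
-- exact hand port of raw.rstrip("\r\n"): drop trailing '\r' / '\n' characters
def pvClean (raw : String) : String :=
  String.ofList ((raw.toList.reverse.dropWhile (fun c => c == '\r' || c == '\n')).reverse)

-- exact port of line.strip().lower() == "done" (PySem.Chars on the code points)
def pvIsDone (line : String) : Bool :=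
  PySem.Chars.lower (PySem.Chars.strip line.toList) == "done".toList

-- ===== PORT A =====
def split_serial_into_runs (lines : List String) (expected_runs : Int) : List (List String) :=
  if expected_runs ≤ 0 then []  -- Python raises ValueError here (excluded by Pre_)
  else
    let st := lines.foldl
      (fun (st : List (List String) × List String) raw =>
        let line := pvClean raw
        let current := st.2 ++ [line]
        if pvIsDone line then (st.1 ++ [current], ([] : List String)) else (st.1, current))
      ([], [])
    let runs := st.1
    if (runs.length : Int) < expected_runs then []  -- Python raises ValueError (excluded by Pre_)
    else if (runs.length : Int) > expected_runs then runs.take expected_runs.toNat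
    else runs

-- ===== PORT B =====
def split_serial_into_runs_alt (lines : List String) (expected_runs : Int) : List (List String) :=
  if expected_runs ≤ 0 then []  -- Python raises ValueError here (excluded by Pre_)
  else
    let cleaned := lines.map pvClean
    let bounds := ((PySem.List.enumerate cleaned 0).filter (fun p => pvIsDone p.2)).map (·.1)
    if (bounds.length : Int) < expected_runs then []  -- Python raises ValueError (excluded by Pre_)
    else
      let bounds' := bounds.take expected_runs.toNat
      (((-1 : Int) :: bounds').zip bounds').map
        (fun p => PySem.List.slice cleaned (some (p.1 + 1)) (some (p.2 + 1)))

-- ===== PRECONDITION & SPEC =====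
-- Pre_ excludes exactly the inputs on which A raises ValueError: a non-positive
-- expected_runs, or fewer 'done' terminator lines than expected_runs.
def Pre_split_serial_into_runs (lines : List String) (expected_runs : Int) : Prop :=
  0 < expected_runs ∧
  expected_runs ≤ (lines.countP (fun raw => pvIsDone (pvClean raw)) : Int)
instance (lines : List String) (expected_runs : Int) : Decidable (Pre_split_serial_into_runs lines expected_runs) := by unfold Pre_split_serial_into_runs; infer_instance

def pvWitness_split_serial_into_runs : List String × Int := (["hello", "done", "x", "DONE\r\n"], 2)

def Spec_split_serial_into_runs (lines : List String) (expected_runs : Int) (out : List (List String)) : Prop := out = split_serial_into_runs_alt lines expected_runs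
instance (lines : List String) (expected_runs : Int) (out : List (List String)) : Decidable (Spec_split_serial_into_runs lines expected_runs out) := by unfold Spec_split_serial_into_runs; infer_instance

-- ===== CLAIM (what is proved, stated in full; the proofs are below) =====
def Claim_equal_split_serial_into_runs : Prop := ∀ (lines : List String) (expected_runs : Int), Dom_split_serial_into_runs lines expected_runs → Pre_split_serial_into_runs lines expected_runs → Spec_split_serial_into_runs lines expected_runs (split_serial_into_runs lines expected_runs)

-- ===== LEMMAS AND PROOFS =====

-- the completed run blocks of a cleaned line list (trailing incomplete block discarded)
def pvChunks : List String → List (List String)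
  | [] => []
  | c :: xs =>
    if pvIsDone c then [c] :: pvChunks xs
    else match pvChunks xs with
      | [] => []
      | r :: rs => (c :: r) :: rs

-- prepend a pending prefix to the first completed block
def pvAttach (cur : List String) : List (List String) → List (List String)
  | [] => []
  | r :: rs => (cur ++ r) :: rs

-- the 'done' indices of a cleaned line list
def pvDoneIdx (xs : List String) : List Int :=
  ((PySem.List.enumerate xs 0).filter (fun p => pvIsDone p.2)).map (·.1)

lemma pvAttach_nil (l : List (List String)) : pvAttach [] l = l := by
  cases l <;> simp [pvAttach]

lemma pvFoldA (xs : List String) (runs : List (List String)) (cur : List String) :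
    (xs.foldl
      (fun (st : List (List String) × List String) raw =>
        let line := pvClean raw
        let current := st.2 ++ [line]
        if pvIsDone line then (st.1 ++ [current], ([] : List String)) else (st.1, current))
      (runs, cur)).1 = runs ++ pvAttach cur (pvChunks (xs.map pvClean)) := by
  induction xs generalizing runs cur with
  | nil => simp [pvChunks, pvAttach]
  | cons x xs ih =>
    simp only [List.foldl_cons, List.map_cons, pvChunks]
    by_cases h : pvIsDone (pvClean x) = true
    · simp [h, ih, pvAttach]
      cases pvChunks (List.map pvClean xs) <;> rfl
    · rcases hc : pvChunks (xs.map pvClean) with _ | ⟨r, rs⟩ <;>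
        simp [h, ih, hc, pvAttach, List.append_assoc]

lemma pvDoneIdx_shift (xs : List String) (s : Int) :
    ((PySem.List.enumerate xs s).filter (fun p => pvIsDone p.2)).map (·.1)
      = (pvDoneIdx xs).map (· + s) := by
  induction xs generalizing s with
  | nil => simp [pvDoneIdx, PySem.List.enumerate]
  | cons x xs ih =>
    have hR : pvDoneIdx (x :: xs)
        = (if pvIsDone x = true then ((0 : Int) :: (pvDoneIdx xs).map (· + 1))
           else (pvDoneIdx xs).map (· + 1)) := by
      unfold pvDoneIdx
      rw [PySem.List.enumerate_cons]
      by_cases h : pvIsDone x = true <;> simp [h, ih 1, pvDoneIdx]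
    rw [hR, PySem.List.enumerate_cons]
    have hcomp : ∀ (D : List Int), (D.map (· + 1)).map (· + s) = D.map (· + (s + 1)) := by
      intro D; rw [List.map_map]; apply List.map_congr_left; intro a _; simp; omega
    by_cases h : pvIsDone x = true <;>
      simp [h, ih (s + 1), pvDoneIdx] <;> (intros; omega)

lemma pvDoneIdx_cons (x : String) (xs : List String) :
    pvDoneIdx (x :: xs)
      = (if pvIsDone x then [(0 : Int)] else []) ++ (pvDoneIdx xs).map (· + 1) := by
  unfold pvDoneIdx
  rw [PySem.List.enumerate_cons]
  by_cases h : pvIsDone x = true <;>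
    simp [h, pvDoneIdx_shift xs 1, pvDoneIdx]

lemma pvDoneIdx_nonneg (xs : List String) : ∀ i ∈ pvDoneIdx xs, 0 ≤ i := by
  induction xs with
  | nil => simp [pvDoneIdx, PySem.List.enumerate]
  | cons x xs ih =>
    intro i hi
    rw [pvDoneIdx_cons] at hi
    rcases List.mem_append.mp hi with h | h
    · by_cases hx : pvIsDone x = true
      · simp [hx] at h; omega
      · simp [hx] at h
    · rcases List.mem_map.mp h with ⟨j, hj, rfl⟩
      have := ih j hj; omega

lemma pvChunks_length (xs : List String) : (pvChunks xs).length = (pvDoneIdx xs).length := by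
  induction xs with
  | nil => simp [pvChunks, pvDoneIdx, PySem.List.enumerate]
  | cons x xs ih =>
    rw [pvDoneIdx_cons]
    by_cases h : pvIsDone x = true
    · simp [pvChunks, h, ih]
    · rcases hc : pvChunks xs with _ | ⟨r, rs⟩ <;>
        simp [pvChunks, h, hc, ← ih]

lemma pvDoneIdx_length (xs : List String) : (pvDoneIdx xs).length = xs.countP pvIsDone := by
  induction xs with
  | nil => simp [pvDoneIdx, PySem.List.enumerate]
  | cons x xs ih =>
    rw [pvDoneIdx_cons, List.countP_cons]
    by_cases h : pvIsDone x = true <;> simp [h, ih]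

lemma pvSlice_cons_succ (c : String) (xs : List String) (a b : Int)
    (ha : 0 ≤ a) (hb : 0 ≤ b) :
    PySem.List.slice (c :: xs) (some (a + 1)) (some (b + 1))
      = PySem.List.slice xs (some a) (some b) := by
  rw [PySem.List.slice_toNat _ (by omega) (by omega), PySem.List.slice_toNat _ ha hb]
  have h1 : (a + 1).toNat = a.toNat + 1 := by omega
  have h2 : (b + 1).toNat = b.toNat + 1 := by omega
  simp [h1, h2, Nat.succ_sub_succ]

lemma pvSlices_eq_chunks (xs : List String) :
    (((-1 : Int) :: pvDoneIdx xs).zip (pvDoneIdx xs)).map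
        (fun p => PySem.List.slice xs (some (p.1 + 1)) (some (p.2 + 1)))
      = pvChunks xs := by
  induction xs with
  | nil => simp [pvDoneIdx, PySem.List.enumerate, pvChunks]
  | cons c xs ih =>
    have hnn := pvDoneIdx_nonneg xs
    -- shifted-pairs lemma: mapping the slice of (c :: xs) over the shifted zip
    have hshift : ∀ (B : List Int), (∀ i ∈ B, 0 ≤ i) → ∀ (p0 : Int), -1 ≤ p0 →
        (((p0 + 1) :: B.map (· + 1)).zip (B.map (· + 1))).map
          (fun p => PySem.List.slice (c :: xs) (some (p.1 + 1)) (some (p.2 + 1)))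
        = ((p0 :: B).zip B).map
          (fun p => PySem.List.slice xs (some (p.1 + 1)) (some (p.2 + 1))) := by
      intro B
      induction B with
      | nil => intro _ p0 _; simp
      | cons b B ihB =>
        intro hB p0 hp0
        have hb : 0 ≤ b := hB b (by simp)
        simp only [List.map_cons, List.zip_cons_cons, List.map_cons]
        rw [show p0 + 1 + 1 = (p0 + 1) + 1 from rfl]
        rw [show b + 1 + 1 = (b + 1) + 1 from rfl]
        rw [pvSlice_cons_succ c xs (p0 + 1) (b + 1) (by omega) (by omega)]
        rw [ihB (fun i hi => hB i (by simp [hi])) b (by omega)]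
    rw [pvDoneIdx_cons]
    by_cases h : pvIsDone c = true
    · simp only [h, if_true, List.singleton_append, List.zip_cons_cons, List.map_cons]
      have hs := hshift (pvDoneIdx xs) hnn (-1) (by omega)
      norm_num at hs
      rw [hs, ih]
      have hhead : PySem.List.slice (c :: xs) (some (-1 + 1)) (some (0 + 1)) = [c] := by
        rw [PySem.List.slice_toNat _ (by norm_num) (by norm_num)]
        norm_num
      rw [hhead]
      simp [pvChunks, h]
    · simp only [h, if_false, List.nil_append, Bool.false_eq_true]
      rcases hB : pvDoneIdx xs with _ | ⟨b, B2⟩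
      · have hnil : pvChunks xs = [] :=
          List.eq_nil_iff_length_eq_zero.mpr (by rw [pvChunks_length, hB]; rfl)
        simp [pvChunks, h, hnil]
      · have hb : 0 ≤ b := pvDoneIdx_nonneg xs b (by rw [hB]; simp)
        have hB2 : ∀ i ∈ B2, 0 ≤ i := fun i hi => pvDoneIdx_nonneg xs i (by rw [hB]; simp [hi])
        simp only [List.map_cons, List.zip_cons_cons]
        have hs := hshift B2 hB2 b (by omega)
        rw [hs]
        rw [hB] at ih
        simp only [List.zip_cons_cons, List.map_cons] at ih
        have hhead : PySem.List.slice (c :: xs) (some (-1 + 1)) (some (b + 1 + 1))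
            = c :: PySem.List.slice xs (some (-1 + 1)) (some (b + 1)) := by
          rw [PySem.List.slice_toNat _ (by norm_num) (by omega),
              PySem.List.slice_toNat _ (by norm_num) (by omega)]
          have h1 : (b + 1 + 1).toNat = (b + 1).toNat + 1 := by omega
          simp [h1]
        rw [hhead]
        conv_rhs => rw [pvChunks]
        rw [← ih]
        simp [h]

lemma pvZip_take (n : Nat) (p : Int) (B : List Int) :
    ((p :: B.take n).zip (B.take n)) = ((p :: B).zip B).take n := by
  induction n generalizing p B with
  | zero => simp
  | succ n ih =>
    cases B with
    | nil => simp
    | cons b B => simp [List.zip_cons_cons, ih b B]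

-- ===== VERDICT (by name: the statement is the Claim_ definition above) =====
theorem split_serial_into_runs_spec : Claim_equal_split_serial_into_runs := by
  intro lines n _ hpre
  obtain ⟨hpos, hcnt⟩ := hpre
  have hcntP : lines.countP (fun raw => pvIsDone (pvClean raw))
      = (lines.map pvClean).countP pvIsDone := by
    rw [List.countP_map]; rfl
  have hlenC : (pvChunks (lines.map pvClean)).length
      = (lines.map pvClean).countP pvIsDone := by
    rw [pvChunks_length, pvDoneIdx_length]
  have hcnt' : n ≤ ((lines.map pvClean).countP pvIsDone : Int) := by
    rw [← hcntP]; exact hcnt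
  have hA : split_serial_into_runs lines n
      = (pvChunks (lines.map pvClean)).take n.toNat := by
    unfold split_serial_into_runs
    rw [if_neg (by omega)]
    simp only [pvFoldA, pvAttach_nil, List.nil_append]
    have hge : ¬ (((pvChunks (lines.map pvClean)).length : Int) < n) := by
      rw [hlenC]; omega
    rw [if_neg hge]
    by_cases hgt : ((pvChunks (lines.map pvClean)).length : Int) > n
    · rw [if_pos hgt]
    · rw [if_neg hgt, List.take_of_length_le (by omega)]
  have hB : split_serial_into_runs_alt lines n
      = (pvChunks (lines.map pvClean)).take n.toNat := by
    unfold split_serial_into_runs_alt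
    rw [if_neg (by omega)]
    simp only []
    rw [show ((PySem.List.enumerate (lines.map pvClean) 0).filter
          (fun p => pvIsDone p.2)).map (·.1) = pvDoneIdx (lines.map pvClean) from rfl]
    have hge : ¬ (((pvDoneIdx (lines.map pvClean)).length : Int) < n) := by
      rw [pvDoneIdx_length]; omega
    rw [if_neg hge, pvZip_take n.toNat (-1) (pvDoneIdx (lines.map pvClean)),
        List.map_take, pvSlices_eq_chunks]
  unfold Spec_split_serial_into_runs
  rw [hA, hB]
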